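-- pv_equiv track=rewrite | github.com/vasechkinn/algorithms | func/reverse_even.py | reverse_even_elements
-- ===== SOURCE A (Python) =====
-- def reverse_even_elements(arr: list) -> list:
--     if not isinstance(arr, list):
--         raise TypeError('ne list')
--
--     if len(arr) == 0:
--         raise ValueError('net ^_^')
--
--     even_elems_i = []
--     for i in range(len(arr)):
--         if arr[i] % 2 == 0:
--             even_elems_i.append(i)
--
--     new_arr = []
--     for i in even_elems_i:
--         new_arr.append(arr[i])
--
--     arr_reverse = []
--     for i in range(len(new_arr)-1, -1, -1):
--         arr_reverse.append(new_arr[i])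
--
--     for i in range(len(even_elems_i)):
--         arr[even_elems_i[i]] = arr_reverse[i]
--
--     return arr
-- ===== SOURCE B (Python) =====
-- def reverse_even_elements(arr: list) -> list:
--     if not isinstance(arr, list):
--         raise TypeError('ne list')
--     if len(arr) == 0:
--         raise ValueError('net ^_^')
--     stack = [x for x in arr if x % 2 == 0]
--     out = []
--     for x in arr:
--         if x % 2 == 0:
--             out.append(stack.pop())
--         else:
--             out.append(x)
--     arr[:] = out
--     return arr
-- ===== Notes on version B (the rewrite author's own statement) =====
-- stated objective: simpler
-- what changed: Replaces A's four index-based passes (collect even indices, gather values, reverse by countdown, write back by index) with one pass over the values that pops each replacement from the end of a stack of the even elements; no index arithmetic at all.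
import Mathlib
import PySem

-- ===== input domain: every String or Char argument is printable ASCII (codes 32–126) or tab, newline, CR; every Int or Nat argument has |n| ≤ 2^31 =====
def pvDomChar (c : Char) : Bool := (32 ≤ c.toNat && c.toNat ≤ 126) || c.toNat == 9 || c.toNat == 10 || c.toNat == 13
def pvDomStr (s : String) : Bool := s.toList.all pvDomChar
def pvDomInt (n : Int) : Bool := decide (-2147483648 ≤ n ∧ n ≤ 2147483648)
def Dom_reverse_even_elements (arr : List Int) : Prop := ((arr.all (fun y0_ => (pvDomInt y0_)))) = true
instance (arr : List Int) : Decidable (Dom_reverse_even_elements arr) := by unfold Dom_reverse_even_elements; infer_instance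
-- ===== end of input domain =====

-- B replaces A's four index-based passes with one value pass popping a stack of the even
-- elements (objective: simpler).  Both A and B mutate `arr` in place in Python; the
-- equivalence proved here is about the returned value.

-- ===== PORT A =====
def reverse_even_elements (arr : List Int) : List Int :=
  -- even_elems_i = []; for i in range(len(arr)): if arr[i] % 2 == 0: even_elems_i.append(i)
  let even_elems_i : List Int :=
    (PySem.List.pyRange 0 arr.length 1).foldl
      (fun acc i => if PySem.Int.mod (PySem.List.pyGetD arr i 0) 2 == 0 then acc ++ [i] else acc) []
  -- new_arr = []; for i in even_elems_i: new_arr.append(arr[i])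
  let new_arr : List Int :=
    even_elems_i.foldl (fun acc i => acc ++ [PySem.List.pyGetD arr i 0]) []
  -- arr_reverse = []; for i in range(len(new_arr)-1, -1, -1): arr_reverse.append(new_arr[i])
  let arr_reverse : List Int :=
    (PySem.List.pyRange ((new_arr.length : Int) - 1) (-1) (-1)).foldl
      (fun acc i => acc ++ [PySem.List.pyGetD new_arr i 0]) []
  -- for i in range(len(even_elems_i)): arr[even_elems_i[i]] = arr_reverse[i]
  (PySem.List.pyRange 0 even_elems_i.length 1).foldl
    (fun a i => PySem.List.pySetD a (PySem.List.pyGetD even_elems_i i 0)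
                                    (PySem.List.pyGetD arr_reverse i 0)) arr

-- ===== PORT B =====
def reverse_even_elements_alt (arr : List Int) : List Int :=
  -- stack = [x for x in arr if x % 2 == 0]
  let stack : List Int := arr.filter (fun x => PySem.Int.mod x 2 == 0)
  -- out = []; for x in arr: out.append(stack.pop() if even else x); arr[:] = out; return arr
  (arr.foldl
    (fun (st : List Int × List Int) x =>
      if PySem.Int.mod x 2 == 0 then
        match PySem.List.pop? st.2 with
        | some (v, rest) => (st.1 ++ [v], rest)
        | none => (st.1, st.2)   -- unreachable: stack holds exactly the even elements
      else (st.1 ++ [x], st.2))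
    ([], stack)).1

-- ===== PRECONDITION & SPEC =====
-- A raises ValueError on the empty list (B does too); that input is excluded.
def Pre_reverse_even_elements (arr : List Int) : Prop := arr ≠ []
instance (arr : List Int) : Decidable (Pre_reverse_even_elements arr) := by
  unfold Pre_reverse_even_elements; infer_instance
def pvWitness_reverse_even_elements : List Int := [2, 3, 4, 5, 6]

def Spec_reverse_even_elements (arr : List Int) (out : List Int) : Prop := out = reverse_even_elements_alt arr
instance (arr : List Int) (out : List Int) : Decidable (Spec_reverse_even_elements arr out) := by unfold Spec_reverse_even_elements; infer_instance

-- ===== CLAIM (what is proved, stated in full; the proofs are below) =====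
def Claim_equal_reverse_even_elements : Prop := ∀ (arr : List Int), Dom_reverse_even_elements arr → Pre_reverse_even_elements arr → Spec_reverse_even_elements arr (reverse_even_elements arr)

-- ===== LEMMAS AND PROOFS =====

-- the parity test both programs use
def pvEven (x : Int) : Bool := PySem.Int.mod x 2 == 0

-- indices (offset by k) of the even elements of a list
def pvIdxs (k : Int) : List Int → List Int
  | [] => []
  | x :: xs => if pvEven x then k :: pvIdxs (k + 1) xs else pvIdxs (k + 1) xs

-- substitute, left to right, the even positions of the first list by the elements of the second
def pvMerge : List Int → List Int → List Int
  | [], _ => []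
  | x :: xs, vs =>
    if pvEven x then
      match vs with
      | v :: vs' => v :: pvMerge xs vs'
      | [] => x :: pvMerge xs []
    else x :: pvMerge xs vs

theorem pvIdxs_mem_bound (xs : List Int) (k i : Int) (h : i ∈ pvIdxs k xs) :
    k ≤ i ∧ i < k + xs.length := by
  induction xs generalizing k with
  | nil => simp [pvIdxs] at h
  | cons x xs ih =>
    have hl : ((x :: xs).length : Int) = (xs.length : Int) + 1 := by simp
    simp only [pvIdxs] at h
    split at h
    · rcases List.mem_cons.mp h with rfl | h'
      · omega
      · obtain ⟨h1, h2⟩ := ih (k + 1) h'; omega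
    · obtain ⟨h1, h2⟩ := ih (k + 1) h; omega

theorem pvIdxs_length (xs : List Int) (k : Int) :
    (pvIdxs k xs).length = (xs.filter pvEven).length := by
  induction xs generalizing k with
  | nil => simp [pvIdxs]
  | cons x xs ih =>
    simp only [pvIdxs, List.filter_cons]
    split <;> simp [ih]

theorem pvIdxs_append (xs : List Int) (y : Int) (k : Int) :
    pvIdxs k (xs ++ [y]) =
      pvIdxs k xs ++ (if pvEven y then [k + xs.length] else []) := by
  induction xs generalizing k with
  | nil => simp [pvIdxs]
  | cons x xs ih =>
    simp only [List.cons_append, pvIdxs, ih]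
    have hl : ((x :: xs).length : Int) = (xs.length : Int) + 1 := by simp
    have hc : k + 1 + (xs.length : Int) = k + ((x :: xs).length : Int) := by omega
    rw [hc]
    split <;> simp

-- arr[i] is unaffected by elements appended after position i
theorem pvGet_append_left (xs : List Int) (y : Int) (i : Int)
    (h0 : 0 ≤ i) (h1 : i < xs.length) :
    PySem.List.pyGetD (xs ++ [y]) i 0 = PySem.List.pyGetD xs i 0 := by
  rw [PySem.List.pyGetD_eq_getElem (xs ++ [y]) 0 h0 (by simp; omega),
      PySem.List.pyGetD_eq_getElem xs 0 h0 (by omega)]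
  exact List.getElem_append_left (by omega)

-- A's first loop computes pvIdxs 0 arr
theorem pvA_idxs (arr : List Int) :
    (PySem.List.pyRange 0 arr.length 1).filter
      (fun i => pvEven (PySem.List.pyGetD arr i 0)) = pvIdxs 0 arr := by
  induction arr using List.reverseRecOn with
  | nil => simp [pvIdxs, PySem.List.pyRange_one_eq_nil]
  | append_singleton xs y ih =>
    have hlen : ((xs ++ [y]).length : Int) = (xs.length : Int) + 1 := by simp
    rw [hlen, PySem.List.pyRange_one_succ_right (by positivity), List.filter_append]
    have h1 : (PySem.List.pyRange 0 xs.length 1).filter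
        (fun i => pvEven (PySem.List.pyGetD (xs ++ [y]) i 0)) =
        (PySem.List.pyRange 0 xs.length 1).filter
        (fun i => pvEven (PySem.List.pyGetD xs i 0)) := by
      apply List.filter_congr
      intro i hi
      have := (PySem.List.mem_pyRange_one).mp hi
      rw [pvGet_append_left xs y i this.1 (by exact_mod_cast this.2)]
    have h2 : PySem.List.pyGetD (xs ++ [y]) (xs.length : Int) 0 = y := by
      rw [PySem.List.pyGetD_natCast]
      simp [List.getD]
    rw [h1, ih, pvIdxs_append]
    simp only [List.filter_cons, List.filter_nil, h2]
    split <;> simp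

-- gathering arr[i] over pvIdxs 0 arr yields the even elements in order
theorem pvA_vals (arr : List Int) :
    (pvIdxs 0 arr).map (fun i => PySem.List.pyGetD arr i 0) = arr.filter pvEven := by
  induction arr using List.reverseRecOn with
  | nil => simp [pvIdxs]
  | append_singleton xs y ih =>
    rw [pvIdxs_append, List.map_append, List.filter_append]
    have h1 : (pvIdxs 0 xs).map (fun i => PySem.List.pyGetD (xs ++ [y]) i 0) =
        (pvIdxs 0 xs).map (fun i => PySem.List.pyGetD xs i 0) := by
      apply List.map_congr_left
      intro i hi
      have := pvIdxs_mem_bound xs 0 i hi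
      exact pvGet_append_left xs y i this.1 (by simpa using this.2)
    have h2 : PySem.List.pyGetD (xs ++ [y]) ((0 : Int) + xs.length) 0 = y := by
      rw [zero_add, PySem.List.pyGetD_natCast]
      simp [List.getD]
    rw [h1, ih]
    simp only [List.filter_cons, List.filter_nil]
    split <;> simp

-- a double-indexed loop over range(len(l1)) is a fold over zip l1 l2 (Nat form)
theorem pvFoldl_range_getD {α : Type} (g : α → Int → Int → α) :
    ∀ (l1 l2 : List Int) (init : α), l1.length = l2.length →
    (List.range l1.length).foldl
      (fun a k => g a (l1.getD k 0) (l2.getD k 0)) init =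
    (l1.zip l2).foldl (fun a p => g a p.1 p.2) init := by
  intro l1
  induction l1 with
  | nil => intro l2 init h; simp
  | cons x xs ih =>
    intro l2 init h
    cases l2 with
    | nil => simp at h
    | cons v vs =>
      rw [List.length_cons, List.range_succ_eq_map, List.foldl_cons, List.foldl_map]
      have hfun : (fun (a : α) (k : Nat) =>
          g a ((x :: xs).getD k.succ 0) ((v :: vs).getD k.succ 0)) =
          (fun (a : α) (k : Nat) => g a (xs.getD k 0) (vs.getD k 0)) := by
        funext a k
        rw [Nat.succ_eq_add_one, List.getD_cons_succ, List.getD_cons_succ]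
      simp only [List.getD_cons_zero, hfun]
      rw [ih vs (g init x v) (by simpa using h)]
      simp

-- the same loop, as A writes it over pyRange with pyGetD
theorem pvFoldl_range_double {α : Type} (g : α → Int → Int → α)
    (l1 l2 : List Int) (init : α) (h : l1.length = l2.length) :
    (PySem.List.pyRange 0 l1.length 1).foldl
      (fun a k => g a (PySem.List.pyGetD l1 k 0) (PySem.List.pyGetD l2 k 0)) init =
    (l1.zip l2).foldl (fun a p => g a p.1 p.2) init := by
  rw [PySem.List.pyRange_zero_nat, List.foldl_map]
  have hfun : (fun (a : α) (k : Nat) =>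
      g a (PySem.List.pyGetD l1 ((k : Nat) : Int) 0)
          (PySem.List.pyGetD l2 ((k : Nat) : Int) 0)) =
      (fun (a : α) (k : Nat) => g a (l1.getD k 0) (l2.getD k 0)) := by
    funext a k
    rw [PySem.List.pyGetD_natCast, PySem.List.pyGetD_natCast]
  rw [hfun, pvFoldl_range_getD g l1 l2 init h]

-- writing v at position pre.length
theorem pvSet_at_length (pre : List Int) (x v : Int) (xs : List Int) :
    PySem.List.pySetD (pre ++ x :: xs) (pre.length : Int) v = pre ++ v :: xs := by
  rw [PySem.List.pySetD_natCast]
  induction pre with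
  | nil => simp
  | cons p ps ih => simp [List.set_cons_succ, ih]

-- the write-back loop over zipped (indices, values) is a structural substitution
theorem pvWriteback : ∀ (xs vs pre : List Int),
    vs.length = (xs.filter pvEven).length →
    ((pvIdxs (pre.length) xs).zip vs).foldl
      (fun a p => PySem.List.pySetD a p.1 p.2) (pre ++ xs) = pre ++ pvMerge xs vs := by
  intro xs
  induction xs with
  | nil => intro vs pre h; simp [pvIdxs, pvMerge]
  | cons x xs ih =>
    intro vs pre h
    simp only [pvIdxs, pvMerge, List.filter_cons] at *
    by_cases he : pvEven x
    · simp only [he, if_true] at h ⊢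
      cases vs with
      | nil => simp at h
      | cons v vs' =>
        simp only [List.zip_cons_cons, List.foldl_cons]
        rw [pvSet_at_length]
        have hlen : ((pre ++ [v]).length : Int) = (pre.length : Int) + 1 := by simp
        have := ih vs' (pre ++ [v]) (by simpa using h)
        rw [hlen] at this
        simpa using this
    · simp only [he] at h
      simp only [he]
      have hlen : ((pre ++ [x]).length : Int) = (pre.length : Int) + 1 := by simp
      have := ih vs (pre ++ [x]) (by simpa using h)
      rw [hlen] at this
      simpa using this

-- A computes the structural substitution by the reversed even elements
theorem pvA_eq (arr : List Int) :
    reverse_even_elements arr = pvMerge arr ((arr.filter pvEven).reverse) := by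
  have hidx : (PySem.List.pyRange 0 arr.length 1).foldl
      (fun acc i => if PySem.Int.mod (PySem.List.pyGetD arr i 0) 2 == 0
        then acc ++ [i] else acc) [] = pvIdxs 0 arr := by
    rw [PySem.List.foldl_append_if_eq_filter]
    exact (List.nil_append _).trans (pvA_idxs arr)
  have hval : (pvIdxs 0 arr).foldl
      (fun acc i => acc ++ [PySem.List.pyGetD arr i 0]) [] = arr.filter pvEven := by
    rw [PySem.List.foldl_append_singleton_eq_map]
    exact (List.nil_append _).trans (pvA_vals arr)
  have hrev : (PySem.List.pyRange (((arr.filter pvEven).length : Int) - 1) (-1) (-1)).foldl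
      (fun acc i => acc ++ [PySem.List.pyGetD (arr.filter pvEven) i 0]) [] =
      (arr.filter pvEven).reverse := by
    have h0 : PySem.List.pyRange (((arr.filter pvEven).length : Int) - 1) (-1) (-1) =
        (PySem.List.pyRange 0 ((arr.filter pvEven).length : Int) 1).reverse := by
      rw [PySem.List.pyRange_neg_one_eq_reverse]
      norm_num
    rw [h0, PySem.List.foldl_append_singleton_eq_map, List.nil_append, List.map_reverse,
        PySem.List.map_pyGetD_pyRange_zero']
  have hlen : (pvIdxs 0 arr).length = ((arr.filter pvEven).reverse).length := by
    simp [pvIdxs_length arr 0]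
  unfold reverse_even_elements
  simp only []
  rw [hidx, hval, hrev,
      pvFoldl_range_double (fun a i v => PySem.List.pySetD a i v) _ _ arr hlen]
  have := pvWriteback arr ((arr.filter pvEven).reverse) [] (by simp)
  simpa using this

-- B's single pass with a stack computes the same substitution
theorem pvB_inv : ∀ (xs out s : List Int),
    (xs.filter pvEven).length = s.length →
    xs.foldl
      (fun (st : List Int × List Int) x =>
        if PySem.Int.mod x 2 == 0 then
          match PySem.List.pop? st.2 with
          | some (v, rest) => (st.1 ++ [v], rest)
          | none => (st.1, st.2)
        else (st.1 ++ [x], st.2))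
      (out, s) = (out ++ pvMerge xs s.reverse, []) := by
  intro xs
  induction xs with
  | nil =>
    intro out s h
    simp only [List.filter_nil, List.length_nil] at h
    have : s = [] := List.eq_nil_of_length_eq_zero h.symm
    simp [this, pvMerge]
  | cons x xs ih =>
    intro out s h
    simp only [List.filter_cons] at h
    by_cases he : pvEven x
    · have he' : (PySem.Int.mod x 2 == 0) = true := he
      simp only [he, if_true, List.length_cons] at h
      rcases List.eq_nil_or_concat s with rfl | ⟨ys, y, rfl⟩
      · simp at h
      · rw [List.concat_eq_append] at h ⊢
        simp only [List.foldl_cons, he', if_true, PySem.List.pop?_last]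
        have := ih (out ++ [y]) ys (by simpa using h)
        rw [this]
        simp [pvMerge, he]
    · have he' : (PySem.Int.mod x 2 == 0) = false := by simpa [pvEven] using he
      simp only [he] at h
      simp only [List.foldl_cons, he', Bool.false_eq_true, if_false]
      rw [ih (out ++ [x]) s h]
      simp [pvMerge, he]

theorem pvB_eq (arr : List Int) :
    reverse_even_elements_alt arr = pvMerge arr ((arr.filter pvEven).reverse) := by
  unfold reverse_even_elements_alt
  simp only []
  have := pvB_inv arr [] (arr.filter pvEven) (by simp)
  rw [show arr.filter (fun x => PySem.Int.mod x 2 == 0) = arr.filter pvEven from rfl,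
      this]
  simp

-- ===== VERDICT (by name: the statement is the Claim_ definition above) =====
theorem reverse_even_elements_spec : Claim_equal_reverse_even_elements := by
  intro arr _ _
  unfold Spec_reverse_even_elements
  rw [pvA_eq, pvB_eq]
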